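-- pv_equiv track=rewrite | github.com/cmedina-dev/AOC-2024 | day_21/day_21.py | create_path_directional
-- ===== SOURCE A (Python) =====
-- def create_path_directional(i, j):
--     path = []
--     i_row = j_row = i_col = j_col = -1
--     if i == 1 or i == 2:
--         i_row = 0
--     elif i == 3 or i == 4 or i == 5:
--         i_row = 1
--     if i == 3:
--         i_col = 0
--     elif i == 1 or i == 4:
--         i_col = 1
--     elif i == 2 or i == 5:
--         i_col = 2
--     if j == 1 or j == 2:
--         j_row = 0
--     elif j == 3 or j == 4 or j == 5:
--         j_row = 1
--     if j == 3:
--         j_col = 0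
--     elif j == 1 or j == 4:
--         j_col = 1
--     elif j == 2 or j == 5:
--         j_col = 2
--     while i_row != j_row or i_col != j_col:
--         if i_col > j_col:
--             i_col -= 1
--             path.append('<')
--         elif i_row > j_row:
--             i_row -= 1
--             path.append('^')
--         elif i_row < j_row:
--             i_row += 1
--             path.append('v')
--         elif i_col < j_col:
--             i_col += 1
--             path.append('>')
--     return ''.join(path) + 'A'
-- ===== SOURCE B (Python) =====
-- def create_path_directional(i, j):
--     pos = {1: (0, 1), 2: (0, 2), 3: (1, 0), 4: (1, 1), 5: (1, 2)}
--     i_row, i_col = pos.get(i, (-1, -1))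
--     j_row, j_col = pos.get(j, (-1, -1))
--     return ('<' * max(0, i_col - j_col) + '^' * max(0, i_row - j_row)
--             + 'v' * max(0, j_row - i_row) + '>' * max(0, j_col - i_col) + 'A')
-- ===== Notes on version B (the rewrite author's own statement) =====
-- stated objective: simpler
-- what changed: Replaced the per-button if/elif coordinate chains by a single dict lookup and the step-by-step while-loop walk by a closed-form concatenation of the four move groups ('<','^','v','>') computed from coordinate differences.
import Mathlib
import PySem

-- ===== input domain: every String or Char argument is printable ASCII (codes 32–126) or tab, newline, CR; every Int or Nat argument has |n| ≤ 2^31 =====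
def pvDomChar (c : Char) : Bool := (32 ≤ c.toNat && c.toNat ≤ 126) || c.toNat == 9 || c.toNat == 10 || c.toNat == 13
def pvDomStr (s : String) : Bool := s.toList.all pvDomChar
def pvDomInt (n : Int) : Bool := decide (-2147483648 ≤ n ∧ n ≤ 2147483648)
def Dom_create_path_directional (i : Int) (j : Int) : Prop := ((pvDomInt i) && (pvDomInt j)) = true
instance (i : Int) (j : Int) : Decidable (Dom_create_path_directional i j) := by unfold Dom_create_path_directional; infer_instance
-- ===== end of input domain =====

-- B replaces A's step-by-step while-loop walk by a dict position lookup and a closed-form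
-- concatenation of the four move groups (simpler, no loop); return value only, no side effects.

-- ===== PORT A =====
-- row/column assignment of A's if/elif chains (defaults -1)
def pvRowA (i : Int) : Int :=
  if i = 1 ∨ i = 2 then 0
  else if i = 3 ∨ i = 4 ∨ i = 5 then 1
  else -1

def pvColA (i : Int) : Int :=
  if i = 3 then 0
  else if i = 1 ∨ i = 4 then 1
  else if i = 2 ∨ i = 5 then 2
  else -1

-- A's while loop; fuel only makes the recursion structural (16 steps always suffice: each
-- coordinate lies in [-1, 2], so at most 3 + 3 moves are ever taken).
def pvLoopA (fuel : Nat) (ir ic jr jc : Int) (path : List Char) : List Char :=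
  match fuel with
  | 0 => path
  | fuel + 1 =>
    if ir ≠ jr ∨ ic ≠ jc then
      if ic > jc then pvLoopA fuel ir (ic - 1) jr jc (path ++ ['<'])
      else if ir > jr then pvLoopA fuel (ir - 1) ic jr jc (path ++ ['^'])
      else if ir < jr then pvLoopA fuel (ir + 1) ic jr jc (path ++ ['v'])
      else if ic < jc then pvLoopA fuel ir (ic + 1) jr jc (path ++ ['>'])
      else path
    else path

def create_path_directional (i : Int) (j : Int) : String :=
  String.mk (pvLoopA 16 (pvRowA i) (pvColA i) (pvRowA j) (pvColA j) [] ++ ['A'])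

-- ===== PORT B =====
def pvPosB : PySem.Dict Int (Int × Int) :=
  PySem.Dict.ofList [(1, (0, 1)), (2, (0, 2)), (3, (1, 0)), (4, (1, 1)), (5, (1, 2))]

def create_path_directional_alt (i : Int) (j : Int) : String :=
  let p := PySem.Dict.getD pvPosB i (-1, -1)
  let q := PySem.Dict.getD pvPosB j (-1, -1)
  String.mk (List.replicate (max 0 (p.2 - q.2)).toNat '<'
    ++ List.replicate (max 0 (p.1 - q.1)).toNat '^'
    ++ List.replicate (max 0 (q.1 - p.1)).toNat 'v'
    ++ List.replicate (max 0 (q.2 - p.2)).toNat '>'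
    ++ ['A'])

-- ===== PRECONDITION & SPEC =====
def Spec_create_path_directional (i : Int) (j : Int) (out : String) : Prop := out = create_path_directional_alt i j
instance (i : Int) (j : Int) (out : String) : Decidable (Spec_create_path_directional i j out) := by unfold Spec_create_path_directional; infer_instance

-- ===== CLAIM (what is proved, stated in full; the proofs are below) =====
def Claim_equal_create_path_directional : Prop := ∀ (i : Int) (j : Int), Dom_create_path_directional i j → Spec_create_path_directional i j (create_path_directional i j)

-- ===== LEMMAS AND PROOFS =====

-- A's coordinates land in small finite sets.
lemma pvRowA_mem (i : Int) : pvRowA i ∈ ([-1, 0, 1] : List Int) := by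
  unfold pvRowA; split_ifs <;> simp

lemma pvColA_mem (i : Int) : pvColA i ∈ ([-1, 0, 1, 2] : List Int) := by
  unfold pvColA; split_ifs <;> simp

-- B's dict lookup computes the same coordinate pair as A's if/elif chains.
lemma pvPosB_eq (i : Int) : PySem.Dict.getD pvPosB i (-1, -1) = (pvRowA i, pvColA i) := by
  by_cases h1 : i = 1; · subst h1; decide
  by_cases h2 : i = 2; · subst h2; decide
  by_cases h3 : i = 3; · subst h3; decide
  by_cases h4 : i = 4; · subst h4; decide
  by_cases h5 : i = 5; · subst h5; decide
  have hitems : pvPosB = PySem.Dict.mk [(1, (0, 1)), (2, (0, 2)), (3, (1, 0)), (4, (1, 1)), (5, (1, 2))] := by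
    decide
  unfold pvRowA pvColA
  rw [hitems]
  have e1 : ((1 : Int) == i) = false := beq_eq_false_iff_ne.mpr (fun h => h1 h.symm)
  have e2 : ((2 : Int) == i) = false := beq_eq_false_iff_ne.mpr (fun h => h2 h.symm)
  have e3 : ((3 : Int) == i) = false := beq_eq_false_iff_ne.mpr (fun h => h3 h.symm)
  have e4 : ((4 : Int) == i) = false := beq_eq_false_iff_ne.mpr (fun h => h4 h.symm)
  have e5 : ((5 : Int) == i) = false := beq_eq_false_iff_ne.mpr (fun h => h5 h.symm)
  simp [PySem.Dict.getD, PySem.Dict.get?, List.find?, e1, e2, e3, e4, e5, h1, h2, h3, h4, h5]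

-- The loop equals the closed form, checked over all coordinate values A can produce.
lemma pvLoop_closed :
    ∀ ir ∈ ([-1, 0, 1] : List Int), ∀ ic ∈ ([-1, 0, 1, 2] : List Int),
    ∀ jr ∈ ([-1, 0, 1] : List Int), ∀ jc ∈ ([-1, 0, 1, 2] : List Int),
    pvLoopA 16 ir ic jr jc [] =
      List.replicate (max 0 (ic - jc)).toNat '<'
        ++ List.replicate (max 0 (ir - jr)).toNat '^'
        ++ List.replicate (max 0 (jr - ir)).toNat 'v'
        ++ List.replicate (max 0 (jc - ic)).toNat '>' := by
  decide

-- ===== VERDICT (by name: the statement is the Claim_ definition above) =====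
theorem create_path_directional_spec : Claim_equal_create_path_directional := by
  intro i j _
  unfold Spec_create_path_directional create_path_directional create_path_directional_alt
  rw [pvPosB_eq, pvPosB_eq]
  rw [pvLoop_closed _ (pvRowA_mem i) _ (pvColA_mem i) _ (pvRowA_mem j) _ (pvColA_mem j)]
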